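-- pv_equiv track=rewrite | github.com/ryannmperez/Estimate_Isotope_Incorporation | graph_sequence_coverage.py | find_peptide_positions
-- ===== SOURCE A (Python) =====
-- def find_peptide_positions(peptide, full_sequence):
--     positions = []
--     peptide = peptide.strip().upper()
--     full_sequence = full_sequence.upper()
--     index = full_sequence.find(peptide)
--     while index != -1:
--         # Positions are 1-based indexing
--         start_pos = index + 1
--         end_pos = start_pos + len(peptide) - 1
--         positions.extend(range(start_pos, end_pos + 1))
--         # Look for the next occurrence
--         index = full_sequence.find(peptide, index + 1)
--     return positions
-- ===== SOURCE B (Python) =====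
-- def find_peptide_positions(peptide, full_sequence):
--     peptide = peptide.strip().upper()
--     full_sequence = full_sequence.upper()
--     m = len(peptide)
--     positions = []
--     for i in range(len(full_sequence) - m + 1):
--         if full_sequence[i:i + m] == peptide:
--             positions.extend(range(i + 1, i + m + 1))
--     return positions
-- ===== Notes on version B (the rewrite author's own statement) =====
-- stated objective: alternative
-- what changed: Replaces A's str.find-advancing while loop by a single exhaustive scan over every start index with a slice comparison, emitting the same 1-based position blocks for the same overlapping matches in the same order.
import Mathlib
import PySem

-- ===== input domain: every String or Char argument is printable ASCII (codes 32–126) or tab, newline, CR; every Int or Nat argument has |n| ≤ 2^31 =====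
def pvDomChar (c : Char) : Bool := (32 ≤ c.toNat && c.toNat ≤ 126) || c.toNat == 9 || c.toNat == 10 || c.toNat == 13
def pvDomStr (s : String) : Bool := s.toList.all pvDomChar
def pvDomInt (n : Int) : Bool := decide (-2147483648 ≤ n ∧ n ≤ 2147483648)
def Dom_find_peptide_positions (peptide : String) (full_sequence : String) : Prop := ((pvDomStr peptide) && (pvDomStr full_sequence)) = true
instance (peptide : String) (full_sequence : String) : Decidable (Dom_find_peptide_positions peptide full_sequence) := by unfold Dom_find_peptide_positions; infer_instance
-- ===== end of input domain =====

-- B replaces A's str.find-advancing while loop by an exhaustive per-start slice comparison (same matches, same order); equivalence of the two traversals is proved below.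

-- ===== PORT A =====
-- the while loop of A: `index` is the current find result; fuel bounds the iteration count
-- (the loop runs at most seq.length + 1 times, proved in the lemmas below; fuel never runs out on any input)
def pvLoopA (seq pep : List Char) : Nat → Int → List Int → List Int
  | 0, _, positions => positions
  | fuel + 1, index, positions =>
    if index = -1 then positions
    else
      let start_pos := index + 1
      let end_pos := start_pos + (pep.length : Int) - 1
      pvLoopA seq pep fuel (PySem.Chars.findFrom seq pep (index + 1) none)
        (positions ++ PySem.List.pyRange start_pos (end_pos + 1) 1)

def find_peptide_positions (peptide : String) (full_sequence : String) : List Int :=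
  let pep := PySem.Chars.upper (PySem.Chars.strip peptide.toList)
  let seq := PySem.Chars.upper full_sequence.toList
  pvLoopA seq pep (seq.length + 2) (PySem.Chars.find seq pep) []

-- ===== PORT B =====
-- Python's `range(len(full_sequence) - m + 1)` is empty when the bound is negative, which
-- `List.range (seq.length + 1 - m)` (truncated Nat subtraction) reproduces exactly.
def find_peptide_positions_alt (peptide : String) (full_sequence : String) : List Int :=
  let pep := PySem.Chars.upper (PySem.Chars.strip peptide.toList)
  let seq := PySem.Chars.upper full_sequence.toList
  let m := pep.length
  (List.range (seq.length + 1 - m)).foldl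
    (fun (positions : List Int) (i : Nat) =>
      if PySem.List.slice seq (some (i : Int)) (some ((i : Int) + (m : Int))) = pep then
        positions ++ PySem.List.pyRange ((i : Int) + 1) ((i : Int) + (m : Int) + 1) 1
      else positions) []

-- ===== PRECONDITION & SPEC =====
def Spec_find_peptide_positions (peptide : String) (full_sequence : String) (out : List Int) : Prop := out = find_peptide_positions_alt peptide full_sequence
instance (peptide : String) (full_sequence : String) (out : List Int) : Decidable (Spec_find_peptide_positions peptide full_sequence out) := by unfold Spec_find_peptide_positions; infer_instance

-- ===== CLAIM (what is proved, stated in full; the proofs are below) =====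
def Claim_equal_find_peptide_positions : Prop := ∀ (peptide : String) (full_sequence : String), Dom_find_peptide_positions peptide full_sequence → Spec_find_peptide_positions peptide full_sequence (find_peptide_positions peptide full_sequence)

-- ===== LEMMAS AND PROOFS =====

-- the block of 1-based positions emitted for a match starting at i
def pvBlk (m i : Nat) : List Int := PySem.List.pyRange ((i : Int) + 1) ((i : Int) + (m : Int) + 1) 1

-- common description of both results: blocks for all match positions ≥ k, in increasing order
def pvSpec (seq pep : List Char) (k : Nat) : List Int :=
  ((List.range' k (seq.length + 1 - k)).filter (fun i => decide (pep <+: seq.drop i))).flatMap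
    (pvBlk pep.length)

lemma pvFindFrom_past (s sub : List Char) (k : Nat) (h : s.length < k) :
    PySem.Chars.findFrom s sub (k : Int) none = -1 := by
  unfold PySem.Chars.findFrom
  have h1 : ¬ ((k : Int) < 0) := by omega
  simp only [h1, if_false]
  rw [if_pos]; omega

lemma pvSpec_nil_of_no_match (seq pep : List Char) (k : Nat)
    (h : ∀ i, k ≤ i → ¬ pep <+: seq.drop i) : pvSpec seq pep k = [] := by
  unfold pvSpec
  rw [List.filter_eq_nil_iff.2, List.flatMap_nil]
  intro i hi
  have := (List.mem_range'_1.1 hi).1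
  simpa using h i this

lemma pvSpec_step (seq pep : List Char) (k R : Nat) (hkR : k ≤ R) (hRn : R ≤ seq.length)
    (hP : pep <+: seq.drop R) (hmin : ∀ i, k ≤ i → i < R → ¬ pep <+: seq.drop i) :
    pvSpec seq pep k = pvBlk pep.length R ++ pvSpec seq pep (R + 1) := by
  unfold pvSpec
  have hsplit : List.range' k (seq.length + 1 - k) =
      List.range' k (R - k) ++ List.range' R (seq.length + 1 - R) := by
    rw [show seq.length + 1 - k = (R - k) + (seq.length + 1 - R) by omega,
      ← List.range'_append_1, show k + (R - k) = R by omega]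
  have hcons : List.range' R (seq.length + 1 - R) = R :: List.range' (R + 1) (seq.length - R) := by
    have : seq.length + 1 - R = (seq.length - R) + 1 := by omega
    rw [this, List.range'_succ]
  rw [hsplit, List.filter_append, hcons]
  have h1 : (List.range' k (R - k)).filter (fun i => decide (pep <+: seq.drop i)) = [] := by
    rw [List.filter_eq_nil_iff.2]
    intro i hi
    have := List.mem_range'_1.1 hi
    simpa using hmin i this.1 (by omega)
  rw [h1]
  simp [hP]

lemma pvLoopA_spec (seq pep : List Char) :
    ∀ (fuel k : Nat) (acc : List Int), k ≤ seq.length + 1 → seq.length + 2 - k ≤ fuel →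
      pvLoopA seq pep fuel (PySem.Chars.findFrom seq pep (k : Int) none) acc =
        acc ++ pvSpec seq pep k := by
  intro fuel
  induction fuel with
  | zero => intro k acc h1 h2; omega
  | succ fuel ih =>
    intro k acc hk hfuel
    by_cases hlast : k = seq.length + 1
    · subst hlast
      rw [pvFindFrom_past seq pep _ (by omega)]
      have : pvSpec seq pep (seq.length + 1) = [] := by
        unfold pvSpec
        simp
      simp [pvLoopA, this]
    · have hkn : k ≤ seq.length := by omega
      by_cases hr : PySem.Chars.findFrom seq pep (k : Int) none = -1
      · rw [hr]
        have hni : ¬ pep <:+: seq.drop k :=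
          (PySem.Chars.findFrom_natCast_eq_neg_one_iff seq pep k hkn).1 hr
        have : pvSpec seq pep k = [] := by
          apply pvSpec_nil_of_no_match
          intro i hi hpre
          apply hni
          have hdrop : seq.drop i = (seq.drop k).drop (i - k) := by
            rw [List.drop_drop]; congr 1; omega
          rw [hdrop] at hpre
          exact hpre.isInfix.trans (List.drop_suffix (i - k) (seq.drop k)).isInfix
        simp [pvLoopA, this]
      · obtain ⟨hkr, hpre, hmin⟩ := PySem.Chars.findFrom_natCast_spec seq pep k hkn hr
        set r := PySem.Chars.findFrom seq pep (k : Int) none with hrdef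
        have hr0 : 0 ≤ r := le_trans (by omega) hkr
        set R := r.toNat with hRdef
        have hrR : r = (R : Int) := by omega
        have hkR : k ≤ R := by omega
        have hRn : R ≤ seq.length := by
          by_cases hpep : pep = []
          · subst hpep
            have := hmin k (le_refl k)
            by_contra h
            exact (this (by omega)) (List.nil_prefix)
          · have hlen : pep.length ≤ (seq.drop R).length := hpre.length_le
            have hml : 1 ≤ pep.length := by
              cases pep with
              | nil => exact absurd rfl hpep
              | cons a l => simp
            simp only [List.length_drop] at hlen
            omega
        -- unfold one loop iteration
        show pvLoopA seq pep (fuel + 1) r acc = acc ++ pvSpec seq pep k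
        have hrne : ¬ (r = -1) := hr
        simp only [pvLoopA, if_neg hrne]
        have hcast : r + 1 = ((R + 1 : Nat) : Int) := by omega
        rw [hcast]
        rw [ih (R + 1) _ (by omega) (by omega)]
        rw [pvSpec_step seq pep k R hkR hRn hpre hmin]
        have hblk : PySem.List.pyRange (((R + 1 : Nat) : Int)) (((R + 1 : Nat) : Int) + (pep.length : Int) - 1 + 1) 1 =
            pvBlk pep.length R := by
          unfold pvBlk
          congr 1
          omega
        rw [hblk, List.append_assoc]

-- B's fold collects the blocks of the positions passing the test, in order
lemma pvFoldB {α : Type} (p : α → Prop) [DecidablePred p] (g : α → List Int) :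
    ∀ (l : List α) (acc : List Int),
      l.foldl (fun acc x => if p x then acc ++ g x else acc) acc =
        acc ++ (l.filter (fun x => decide (p x))).flatMap g := by
  intro l
  induction l with
  | nil => intro acc; simp
  | cons a l ih =>
    intro acc
    by_cases h : p a <;> simp [List.foldl_cons, h, ih, List.append_assoc]

lemma pvFilterB (seq pep : List Char) :
    (List.range (seq.length + 1 - pep.length)).filter
        (fun (i : Nat) => decide (PySem.List.slice seq (some (i : Int)) (some ((i : Int) + (pep.length : Int))) = pep)) =
      (List.range' 0 (seq.length + 1)).filter (fun (i : Nat) => decide (pep <+: seq.drop i)) := by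
  set n := seq.length
  set m := pep.length with hm
  have hrange : List.range' 0 (n + 1) = List.range (n + 1) := List.range_eq_range'.symm
  rw [hrange]
  have hcongr : ∀ l : List Nat,
      l.filter (fun (i : Nat) => decide (PySem.List.slice seq (some (i : Int)) (some ((i : Int) + (m : Int))) = pep)) =
        l.filter (fun (i : Nat) => decide (pep <+: seq.drop i)) := by
    intro l
    apply List.filter_congr
    intro i _
    rw [PySem.List.slice_natCast_add]
    have : pep <+: seq.drop i ↔ List.take m (seq.drop i) = pep := by
      rw [List.prefix_iff_eq_take, ← hm, eq_comm]
    simp [this]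
  by_cases hmn : m ≤ n + 1
  · set t := n + 1 - m with ht
    have htail : (List.map (fun x => t + x) (List.range m)).filter
        (fun (i : Nat) => decide (pep <+: seq.drop i)) = [] := by
      rw [List.filter_eq_nil_iff.2]
      intro i hi
      simp only [List.mem_map, List.mem_range] at hi
      obtain ⟨x, hx, rfl⟩ := hi
      simp only [decide_eq_true_eq]
      intro hpre
      have hlen : m ≤ (seq.drop (t + x)).length := hpre.length_le
      simp only [List.length_drop] at hlen
      omega
    rw [show n + 1 = t + m by omega, List.range_add, List.filter_append, ← hcongr, htail,
      List.append_nil]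
  · have h1 : n + 1 - m = 0 := by omega
    rw [h1]
    have h2 : (List.range (n + 1)).filter (fun i => decide (pep <+: seq.drop i)) = [] := by
      rw [List.filter_eq_nil_iff.2]
      intro i hi
      simp only [decide_eq_true_eq]
      intro hpre
      have hlen : m ≤ (seq.drop i).length := hpre.length_le
      simp only [List.length_drop] at hlen
      omega
    rw [h2]
    simp

-- ===== VERDICT (by name: the statement is the Claim_ definition above) =====
theorem find_peptide_positions_spec : Claim_equal_find_peptide_positions := by
  intro peptide full_sequence _
  unfold Spec_find_peptide_positions find_peptide_positions find_peptide_positions_alt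
  show pvLoopA (PySem.Chars.upper full_sequence.toList)
      (PySem.Chars.upper (PySem.Chars.strip peptide.toList)) _ _ [] = _
  generalize PySem.Chars.upper (PySem.Chars.strip peptide.toList) = pep
  generalize PySem.Chars.upper full_sequence.toList = seq
  rw [← PySem.Chars.findFrom_zero]
  rw [show (0 : Int) = ((0 : Nat) : Int) by norm_num,
    pvLoopA_spec seq pep (seq.length + 2) 0 [] (by omega) (by omega)]
  rw [pvFoldB (fun (i : Nat) =>
      PySem.List.slice seq (some (i : Int)) (some ((i : Int) + (pep.length : Int))) = pep)]
  rw [pvFilterB]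
  unfold pvSpec pvBlk
  simp
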